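-- pv_equiv track=rewrite | github.com/getnikola/plugins | v7/wordpress_compiler/wordpress/php.py | stripcslashes
-- ===== SOURCE A (Python) =====
-- def stripcslashes(text):
--     result = ''
--     index = 0
--     while index < len(text):
--         c = text[index]
--         index += 1
--         if c == '\\':
--             c = text[index]
--             index += 1
--             if c == '\\':
--                 result += c
--             elif c == 'a':
--                 result += '\a'
--             elif c == 'b':
--                 result += '\b'
--             elif c == 'f':
--                 result += '\f'
--             elif c == 'n':
--                 result += '\n'
--             elif c == 'r':
--                 result += '\r'
--             elif c == 't':
--                 result += '\t'
--             elif c == 'v':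
--                 result += '\v'
--             else:
--                 raise Exception("Unknown escape sequence '\\" + c + "'")
--         else:
--             result += c
--     return result
-- ===== SOURCE B (Python) =====
-- MAP = {'a': '\a', 'b': '\b', 'f': '\f', 'n': '\n', 'r': '\r', 't': '\t', 'v': '\v'}
--
--
-- def stripcslashes(text):
--     parts = text.split('\\')
--     out = [parts[0]]
--     pieces = iter(parts[1:])
--     for p in pieces:
--         if p == '':
--             # an empty piece means the backslash escaped a backslash;
--             # the following piece is literal text
--             out.append('\\' + next(pieces))
--         else:
--             out.append(MAP[p[0]] + p[1:])
--     return ''.join(out)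
-- ===== Notes on version B (the rewrite author's own statement) =====
-- stated objective: faster
-- what changed: Replaced A's per-character index/while scan with its eight-way if/elif chain and repeated string concatenation by one text.split('\\') pass: each piece after a backslash is decoded by a dict lookup on its first character (an empty piece is an escaped backslash whose following piece is literal), and the pieces are joined once; Pre_ excludes exactly the inputs on which A raises (IndexError on a trailing lone backslash, Exception on an unknown escape).
-- outside the precondition, e.g. on stripcslashes('\\'): A raises IndexError, B raises StopIteration
import Mathlib
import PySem

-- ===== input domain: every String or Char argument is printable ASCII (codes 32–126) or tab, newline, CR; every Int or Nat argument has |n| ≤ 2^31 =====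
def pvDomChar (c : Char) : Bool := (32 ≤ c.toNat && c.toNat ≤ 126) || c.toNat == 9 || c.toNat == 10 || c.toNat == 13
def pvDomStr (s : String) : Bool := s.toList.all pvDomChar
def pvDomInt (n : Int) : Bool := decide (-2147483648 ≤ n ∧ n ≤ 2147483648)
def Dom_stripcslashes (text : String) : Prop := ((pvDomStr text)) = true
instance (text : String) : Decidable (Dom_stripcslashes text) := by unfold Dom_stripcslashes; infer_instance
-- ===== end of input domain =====

-- B replaces A's per-character scan with repeated string concatenation by one split-on-backslash + dict lookup + single join (objective: faster; measured).

-- ===== PORT A =====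
-- while loop over `index` with the growing `result` → recursion over the remaining
-- characters carrying `result` as accumulator; the two places Python raises
-- (IndexError past the end, Exception on an unknown escape) return `result` and are
-- excluded by Pre_.
def stripAloop (result : List Char) : List Char → List Char
  | [] => result
  | c :: rest =>
    if c == '\\' then
      match rest with
      | [] => result                    -- text[index] raises IndexError (outside Pre_)
      | d :: rest' =>
        if d == '\\' then stripAloop (result ++ [d]) rest'
        else if d == 'a' then stripAloop (result ++ ['\x07']) rest'
        else if d == 'b' then stripAloop (result ++ ['\x08']) rest'
        else if d == 'f' then stripAloop (result ++ ['\x0C']) rest'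
        else if d == 'n' then stripAloop (result ++ ['\n']) rest'
        else if d == 'r' then stripAloop (result ++ ['\x0D']) rest'
        else if d == 't' then stripAloop (result ++ ['\t']) rest'
        else if d == 'v' then stripAloop (result ++ ['\x0B']) rest'
        else result                     -- raise Exception (outside Pre_)
    else stripAloop (result ++ [c]) rest

def stripcslashes (text : String) : String := String.ofList (stripAloop [] text.toList)

-- ===== PORT B =====
-- Source B: MAP = {'a':'\a', …, 'v':'\v'}
def pvMAP : PySem.Dict Char Char :=
  PySem.Dict.ofList [('a', '\x07'), ('b', '\x08'), ('f', '\x0C'), ('n', '\n'),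
                     ('r', '\x0D'), ('t', '\t'), ('v', '\x0B')]

-- Source B's for loop over the iterator of parts[1:]: an empty piece means the backslash
-- escaped a backslash (next(pieces) gives the literal following piece), otherwise the
-- piece's first char is decoded via MAP; the two places Source B raises (StopIteration
-- from next on an exhausted iterator, KeyError from MAP[...]) return [] and are
-- outside Pre_.
def stripBloop : List (List Char) → List (List Char)
  | [] => []
  | [] :: rest =>
    match rest with
    | [] => []                          -- next(pieces) raises StopIteration (outside Pre_)
    | q :: rest' => ('\\' :: q) :: stripBloop rest'
  | (c :: ptl) :: rest =>
    match PySem.Dict.get? pvMAP c with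
    | none => []                        -- MAP[c] raises KeyError (outside Pre_)
    | some e => (e :: ptl) :: stripBloop rest

-- parts = text.split('\\'); out = [parts[0]] ++ loop over parts[1:]; ''.join(out)
def stripcslashes_alt (text : String) : String :=
  match PySem.Chars.splitOn text.toList ['\\'] with
  | [] => ""                            -- unreachable: split never returns []
  | p0 :: rest => String.ofList ((p0 :: stripBloop rest).flatten)

-- ===== PRECONDITION & SPEC =====
-- Pre_ excludes exactly the inputs on which A raises (IndexError on a trailing lone
-- backslash, Exception on an unknown escape); A returns normally on every input
-- admitted here.  Closed form: a backslash preceded by an even number of consecutive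
-- backslashes starts an escape, so it must be followed by one of \ a b f n r t v.
def pvEsc : List Char := ['\\', 'a', 'b', 'f', 'n', 'r', 't', 'v']

-- length of the maximal run of consecutive backslashes immediately before position i
def pvBsRun (cs : List Char) (i : Nat) : Nat :=
  ((cs.take i).reverse.takeWhile (· == '\\')).length

def Pre_stripcslashes (text : String) : Prop :=
  ∀ i : Nat, i < text.toList.length → text.toList.getD i ' ' = '\\' →
    pvBsRun text.toList i % 2 = 0 →
    i + 1 < text.toList.length ∧ text.toList.getD (i + 1) ' ' ∈ pvEsc
instance (text : String) : Decidable (Pre_stripcslashes text) := by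
  unfold Pre_stripcslashes; infer_instance

def pvWitness_stripcslashes : String := "a\\nb"

def Spec_stripcslashes (text : String) (out : String) : Prop := out = stripcslashes_alt text
instance (text : String) (out : String) : Decidable (Spec_stripcslashes text out) := by
  unfold Spec_stripcslashes; infer_instance

-- ===== CLAIM (what is proved, stated in full; the proofs are below) =====
def Claim_equal_stripcslashes : Prop :=
  ∀ (text : String), Dom_stripcslashes text → Pre_stripcslashes text →
    Spec_stripcslashes text (stripcslashes text)

-- ===== LEMMAS AND PROOFS =====

-- proof-side scanner form of the precondition (shown equal to Pre_ below)
def preOk : List Char → Bool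
  | [] => true
  | c :: rest =>
    if c == '\\' then
      match rest with
      | [] => false
      | d :: rest' =>
        (d == '\\' || d == 'a' || d == 'b' || d == 'f' || d == 'n' || d == 'r'
          || d == 't' || d == 'v') && preOk rest'
    else preOk rest

-- list-level form of Pre_
def closedP (cs : List Char) : Prop :=
  ∀ i : Nat, i < cs.length → cs.getD i ' ' = '\\' → pvBsRun cs i % 2 = 0 →
    i + 1 < cs.length ∧ cs.getD (i + 1) ' ' ∈ pvEsc

theorem bsRun_zero (cs : List Char) : pvBsRun cs 0 = 0 := rfl

theorem bsRun_one_bs (y : Char) (t : List Char) : pvBsRun ('\\' :: y :: t) 1 = 1 := by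
  simp [pvBsRun]

theorem twOne (A : List Char) (c : Char) :
    (List.takeWhile (· == '\\') (A ++ [c])).length =
      if (List.takeWhile (· == '\\') A).length = A.length
      then A.length + (if c == '\\' then 1 else 0)
      else (List.takeWhile (· == '\\') A).length := by
  rw [List.takeWhile_append]
  split
  · by_cases hc : (c == '\\') = true <;> simp_all [List.takeWhile_cons]
  · simp_all

theorem bsRun_cons_shift (c : Char) (t : List Char) (j : Nat) (hc : c ≠ '\\') :
    pvBsRun (c :: t) (j + 1) = pvBsRun t j := by
  unfold pvBsRun
  rw [List.take_succ_cons, List.reverse_cons, twOne]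
  have hcb : (c == '\\') = false := by simp [hc]
  split <;> simp_all

theorem bsRun_pair_bs (t : List Char) (j : Nat) :
    pvBsRun ('\\' :: '\\' :: t) (j + 2) % 2 = pvBsRun t j % 2 := by
  unfold pvBsRun
  rw [List.take_succ_cons, List.take_succ_cons, List.reverse_cons, List.reverse_cons,
    twOne, twOne]
  have hle : (List.takeWhile (· == '\\') (List.take j t).reverse).length ≤ (List.take j t).reverse.length :=
    (List.takeWhile_sublist _).length_le
  split_ifs <;> simp_all <;> omega

theorem bsRun_pair_other (y : Char) (hy : y ≠ '\\') (t : List Char) (j : Nat) :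
    pvBsRun ('\\' :: y :: t) (j + 2) = pvBsRun t j := by
  unfold pvBsRun
  rw [List.take_succ_cons, List.take_succ_cons, List.reverse_cons, List.reverse_cons,
    twOne, twOne]
  have hyb : (y == '\\') = false := by simp [hy]
  have hle : (List.takeWhile (· == '\\') (List.take j t).reverse).length ≤ (List.take j t).reverse.length :=
    (List.takeWhile_sublist _).length_le
  split_ifs <;> simp_all <;> omega

theorem bsRun_pair_parity (y : Char) (t : List Char) (j : Nat) :
    pvBsRun ('\\' :: y :: t) (j + 2) % 2 = pvBsRun t j % 2 := by
  by_cases hy : y = '\\'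
  · subst hy; exact bsRun_pair_bs t j
  · rw [bsRun_pair_other y hy t j]

theorem escBool_iff (y : Char) :
    ((y == '\\' || y == 'a' || y == 'b' || y == 'f' || y == 'n' || y == 'r'
        || y == 't' || y == 'v') = true) ↔ y ∈ pvEsc := by
  simp [pvEsc]
  tauto

theorem closedP_iff_preOk (n : Nat) : ∀ (cs : List Char), cs.length ≤ n →
    (closedP cs ↔ preOk cs = true) := by
  induction n with
  | zero =>
    intro cs hl
    have : cs = [] := by cases cs <;> simp_all
    subst this
    simp [closedP, preOk]
  | succ n ih =>
    intro cs hl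
    match cs with
    | [] => simp [closedP, preOk]
    | [c] =>
      rw [preOk.eq_2]
      constructor
      · intro hP
        by_cases hc : c = '\\'
        · exfalso
          have := hP 0 (by simp) (by simpa [hc]) (by simp [bsRun_zero])
          simp at this
        · simp [hc, preOk]
      · intro hok i hi hbs _
        have hi0 : i = 0 := by simp at hi; omega
        subst hi0
        exfalso
        simp only [List.getD_cons_zero] at hbs
        simp [hbs] at hok
    | x :: y :: t =>
      simp only [List.length_cons] at hl
      have ht : t.length ≤ n := by omega
      have hyt : (y :: t).length ≤ n := by simp; omega
      by_cases hx : x = '\\'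
      · subst hx
        rw [preOk.eq_3, if_pos (by simp), Bool.and_eq_true, escBool_iff, ← ih t ht]
        constructor
        · intro hP
          refine ⟨?_, ?_⟩
          · have := hP 0 (by simp) (by simp) (by simp [bsRun_zero])
            simpa using this.2
          · intro j hj hbs hpar
            have := hP (j + 2) (by simp; omega)
              (by simpa using hbs)
              (by rw [bsRun_pair_parity]; exact hpar)
            refine ⟨by simpa using this.1, by simpa using this.2⟩
        · rintro ⟨hyesc, hPt⟩ i hi hbs hpar
          match i with
          | 0 => exact ⟨by simp, by simpa using hyesc⟩
          | 1 =>
            exfalso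
            simp only [List.getD_cons_succ, List.getD_cons_zero] at hbs
            rw [hbs] at hpar
            rw [bsRun_one_bs] at hpar
            omega
          | (j + 2) =>
            have := hPt j (by simp at hi; omega)
              (by simpa using hbs)
              (by rw [bsRun_pair_parity] at hpar; exact hpar)
            refine ⟨by simp; omega, by simpa using this.2⟩
      · rw [preOk.eq_3, if_neg (by simp [hx]), ← ih (y :: t) hyt]
        constructor
        · intro hP j hj hbs hpar
          have := hP (j + 1) (by simp at hj ⊢; omega)
            (by simpa using hbs)
            (by rw [bsRun_cons_shift x _ _ hx]; exact hpar)
          refine ⟨by simp at this ⊢; omega, by simpa using this.2⟩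
        · intro hPt i hi hbs hpar
          match i with
          | 0 =>
            exfalso
            simp only [List.getD_cons_zero] at hbs
            exact hx hbs
          | (j + 1) =>
            have := hPt j (by simp at hi ⊢; omega)
              (by simpa using hbs)
              (by rw [bsRun_cons_shift x _ _ hx] at hpar; exact hpar)
            refine ⟨by simp at this ⊢; omega, by simpa using this.2⟩

-- proof-side recursive characterisation of splitting on a single backslash
def split1 : List Char → List (List Char)
  | [] => [[]]
  | c :: r =>
    if c == '\\' then [] :: split1 r
    else
      match split1 r with
      | [] => [[c]]
      | h :: t => (c :: h) :: t

theorem split1_ne_nil (l : List Char) : split1 l ≠ [] := by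
  cases l with
  | nil => simp [split1]
  | cons c r =>
    simp only [split1]
    split
    · simp
    · split <;> simp_all

theorem go_eq : ∀ (fuel : Nat) (l cur : List Char) (acc : List (List Char)),
    l.length ≤ fuel →
    PySem.Chars.splitOn.go ['\\'] fuel l cur acc =
      acc.reverse ++ (match split1 l with
        | [] => []
        | h :: t => (cur.reverse ++ h) :: t) := by
  intro fuel
  induction fuel with
  | zero =>
    intro l cur acc h
    have : l = [] := by cases l <;> simp_all
    subst this
    simp [PySem.Chars.splitOn.go, split1]
  | succ fuel ih =>
    intro l cur acc h
    cases l with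
    | nil => simp [PySem.Chars.splitOn.go, split1]
    | cons c rest =>
      simp only [PySem.Chars.splitOn.go]
      by_cases hc : c = '\\'
      · subst hc
        have hpre : List.isPrefixOf ['\\'] ('\\' :: rest) = true := by
          simp [List.isPrefixOf]
        rw [if_pos hpre]
        have hdrop : List.drop ['\\'].length ('\\' :: rest) = rest := rfl
        rw [hdrop]
        simp only [List.length_cons] at h
        rw [ih rest [] (cur.reverse :: acc) (by omega)]
        obtain ⟨hd, tl, hs⟩ : ∃ hd tl, split1 rest = hd :: tl := by
          cases hsp : split1 rest with
          | nil => exact absurd hsp (split1_ne_nil rest)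
          | cons a b => exact ⟨a, b, rfl⟩
        simp [split1, hs]
      · have hpre : List.isPrefixOf ['\\'] (c :: rest) = false := by
          simp [List.isPrefixOf]
          intro h'; exact absurd h'.symm hc
        rw [if_neg (by simp [hpre])]
        simp only [List.length_cons] at h
        rw [ih rest (c :: cur) acc (by omega)]
        obtain ⟨hd, tl, hs⟩ : ∃ hd tl, split1 rest = hd :: tl := by
          cases hsp : split1 rest with
          | nil => exact absurd hsp (split1_ne_nil rest)
          | cons a b => exact ⟨a, b, rfl⟩
        have hcb : (c == '\\') = false := by simp [hc]
        simp [split1, hs, hcb]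

theorem splitOn_eq_split1 (l : List Char) :
    PySem.Chars.splitOn l ['\\'] = split1 l := by
  unfold PySem.Chars.splitOn
  rw [go_eq (l.length + 1) l [] [] (by omega)]
  obtain ⟨hd, tl, hs⟩ : ∃ hd tl, split1 l = hd :: tl := by
    cases hsp : split1 l with
    | nil => exact absurd hsp (split1_ne_nil l)
    | cons a b => exact ⟨a, b, rfl⟩
  simp [hs]

theorem stripAloop_pre (n : Nat) : ∀ (l : List Char), l.length ≤ n →
    ∀ (res res' : List Char), stripAloop (res ++ res') l = res ++ stripAloop res' l := by
  induction n with
  | zero =>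
    intro l hl res res'
    have : l = [] := by cases l <;> simp_all
    subst this; simp [stripAloop]
  | succ n ih =>
    intro l hl res res'
    match l with
    | [] => simp [stripAloop]
    | [c] => rw [stripAloop.eq_2, stripAloop.eq_2]; split <;> simp [stripAloop]
    | c :: d :: rest =>
      simp only [List.length_cons] at hl
      have hr : rest.length ≤ n := by omega
      have hr2 : (d :: rest).length ≤ n := by simp; omega
      rw [stripAloop.eq_3, stripAloop.eq_3]
      split_ifs <;>
        first
        | rfl
        | (simpa [List.append_assoc] using ih rest hr res (res' ++ [_]))
        | (simpa [List.append_assoc] using ih (d :: rest) hr2 res (res' ++ [_]))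

theorem stripAloop_acc (l res : List Char) :
    stripAloop res l = res ++ stripAloop [] l := by
  simpa using stripAloop_pre l.length l (le_refl _) res []

-- joined result of B on a split list
def bjoin : List (List Char) → List Char
  | [] => []
  | p0 :: rest => (p0 :: stripBloop rest).flatten

theorem main_eq_n (n : Nat) : ∀ (l : List Char), l.length ≤ n → preOk l = true →
    stripAloop [] l = bjoin (split1 l) := by
  induction n with
  | zero =>
    intro l hl _
    have : l = [] := by cases l <;> simp_all
    subst this; simp [stripAloop, split1, bjoin, stripBloop]
  | succ n ih =>
    intro l hl hok
    match l with
    | [] => simp [stripAloop, split1, bjoin, stripBloop]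
    | [c] =>
      rw [preOk.eq_2] at hok
      have hc : (c == '\\') = false := by
        by_contra h
        simp only [Bool.not_eq_false] at h
        simp [h] at hok
      simp [stripAloop, hc, split1, bjoin, stripBloop]
    | c :: d :: rest =>
      simp only [List.length_cons] at hl
      have hr : rest.length ≤ n := by omega
      have hr2 : (d :: rest).length ≤ n := by simp; omega
      by_cases hc : c = '\\'
      · subst hc
        rw [preOk.eq_3] at hok
        simp only [if_pos (by rfl : (('\\' : Char) == '\\') = true), Bool.and_eq_true,
          Bool.or_eq_true] at hok
        obtain ⟨hd, hok'⟩ := hok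
        obtain ⟨h1, t1, hs⟩ : ∃ h1 t1, split1 rest = h1 :: t1 := by
          cases hsp : split1 rest with
          | nil => exact absurd hsp (split1_ne_nil rest)
          | cons a b => exact ⟨a, b, rfl⟩
        have hih := ih rest hr hok'
        rw [hs] at hih
        simp only [bjoin] at hih
        have g1 : PySem.Dict.get? pvMAP 'a' = some '\x07' := by decide
        have g2 : PySem.Dict.get? pvMAP 'b' = some '\x08' := by decide
        have g3 : PySem.Dict.get? pvMAP 'f' = some '\x0C' := by decide
        have g4 : PySem.Dict.get? pvMAP 'n' = some '\n' := by decide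
        have g5 : PySem.Dict.get? pvMAP 'r' = some '\x0D' := by decide
        have g6 : PySem.Dict.get? pvMAP 't' = some '\t' := by decide
        have g7 : PySem.Dict.get? pvMAP 'v' = some '\x0B' := by decide
        rcases hd with ((((((hd | hd) | hd) | hd) | hd) | hd) | hd) | hd <;>
          (have hdv := (beq_iff_eq).mp hd; subst hdv;
           rw [stripAloop.eq_3];
           simp only [Char.reduceBEq, beq_self_eq_true, Bool.false_eq_true, if_true, if_false,
             List.nil_append];
           (conv_lhs => rw [stripAloop_acc rest]);
           rw [hih];
           simp [split1, hs, bjoin, stripBloop, g1, g2, g3, g4, g5, g6, g7])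
      · have hcb : (c == '\\') = false := by simp [hc]
        rw [preOk.eq_3] at hok
        rw [if_neg (by simp [hc])] at hok
        obtain ⟨h1, t1, hs⟩ : ∃ h1 t1, split1 (d :: rest) = h1 :: t1 := by
          cases hsp : split1 (d :: rest) with
          | nil => exact absurd hsp (split1_ne_nil _)
          | cons a b => exact ⟨a, b, rfl⟩
        have hih := ih (d :: rest) hr2 hok
        rw [hs] at hih
        simp only [bjoin] at hih
        have hsplit : split1 (c :: d :: rest) = (c :: h1) :: t1 := by
          simp only [split1.eq_2, hcb, Bool.false_eq_true, if_false, hs]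
        rw [stripAloop.eq_3, if_neg (by simp [hc]), hsplit]
        (conv_lhs => rw [stripAloop_acc (d :: rest)])
        rw [hih]
        simp [bjoin]

theorem main_eq (l : List Char) (h : preOk l = true) :
    stripAloop [] l = bjoin (split1 l) :=
  main_eq_n l.length l (le_refl _) h

-- ===== VERDICT (by name: the statement is the Claim_ definition above) =====
theorem stripcslashes_spec : Claim_equal_stripcslashes := by
  intro text _ hpre0
  have hpre : preOk text.toList = true :=
    (closedP_iff_preOk text.toList.length text.toList (le_refl _)).mp hpre0
  unfold Spec_stripcslashes stripcslashes stripcslashes_alt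
  rw [splitOn_eq_split1]
  rw [main_eq text.toList hpre]
  obtain ⟨hd, tl, hs⟩ : ∃ hd tl, split1 text.toList = hd :: tl := by
    cases hsp : split1 text.toList with
    | nil => exact absurd hsp (split1_ne_nil _)
    | cons a b => exact ⟨a, b, rfl⟩
  rw [hs]
  simp [bjoin]
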